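-- pv_equiv track=rewrite | github.com/ayoubzulfiqar/Leetcode-Medium | KthSmallestSubarraySum/kth_smallest_subarray_sum.py | kthSmallestSubarraySum
-- ===== SOURCE A (Python) =====
-- def kthSmallestSubarraySum(nums: list[int], k: int) -> int:
--     n = len(nums)
--
--     # Calculate prefix sums
--     # prefix_sum[i] stores the sum of nums[0]...nums[i-1]
--     # prefix_sum[0] = 0
--     prefix_sum = [0] * (n + 1)
--     for i in range(n):
--         prefix_sum[i+1] = prefix_sum[i] + nums[i]
--
--     # Generate all subarray sums
--     subarray_sums = []
--     for i in range(n):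
--         for j in range(i, n):
--             # Sum of subarray nums[i...j] is prefix_sum[j+1] - prefix_sum[i]
--             subarray_sums.append(prefix_sum[j+1] - prefix_sum[i])
--
--     # Sort the subarray sums
--     subarray_sums.sort()
--
--     # Return the k-th smallest sum (0-indexed k-1)
--     return subarray_sums[k-1]
-- ===== SOURCE B (Python) =====
-- def kthSmallestSubarraySum(nums: list[int], k: int) -> int:
--     # Bounded selection instead of full sort: keep only the k smallest subarray
--     # sums seen so far in an ascending list `best`, fed by running sums per start.
--     best = []
--     n = len(nums)
--     for i in range(n):
--         s = 0
--         for x in nums[i:]: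
--             s += x
--             if len(best) < k or s < best[-1]:
--                 pos = 0
--                 while pos < len(best) and best[pos] <= s:
--                     pos += 1
--                 best.insert(pos, s)
--                 if len(best) > k:
--                     best.pop()
--     return best[-1]
-- ===== Notes on version B (the rewrite author's own statement) =====
-- stated objective: alternative
-- what changed: B keeps only the k smallest sums seen so far in a bounded sorted buffer fed by running per-start sums, instead of materialising all n(n+1)/2 sums via a prefix-sum table and fully sorting them.
-- outside the precondition, e.g. on kthSmallestSubarraySum([1, 2], 0): A returns 3, B raises IndexError
import Mathlib
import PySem

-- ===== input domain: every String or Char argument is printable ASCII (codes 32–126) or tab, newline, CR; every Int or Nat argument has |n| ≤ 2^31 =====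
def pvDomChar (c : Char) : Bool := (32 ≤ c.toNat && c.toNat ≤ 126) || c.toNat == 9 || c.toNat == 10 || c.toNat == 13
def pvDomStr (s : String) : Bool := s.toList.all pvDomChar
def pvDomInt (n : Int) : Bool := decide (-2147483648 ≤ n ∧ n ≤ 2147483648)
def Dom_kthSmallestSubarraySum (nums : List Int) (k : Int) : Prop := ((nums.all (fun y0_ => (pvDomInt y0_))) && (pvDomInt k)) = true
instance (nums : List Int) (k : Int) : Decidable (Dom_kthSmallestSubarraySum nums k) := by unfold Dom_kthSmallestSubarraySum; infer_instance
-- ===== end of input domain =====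

-- B replaces "materialise all n(n+1)/2 subarray sums, sort, index" by a bounded selection:
-- a sorted buffer of at most k elements keeps the k smallest running sums (alternative algorithm, not claimed faster).


-- ===== PORT A =====
-- the preallocated prefix_sum array is filled left to right, so the loop is rendered
-- as growing the list from [0]; prefix_sum[i] is read with pyGet? (always in range here)
def kthSmallestSubarraySum (nums : List Int) (k : Int) : Int :=
  let n : Int := (nums.length : Int)
  let prefix_sum : List Int := (PySem.List.pyRange 0 n 1).foldl
    (fun ps i => ps ++ [(PySem.List.pyGet? ps i).getD 0 + (PySem.List.pyGet? nums i).getD 0]) [0]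
  let subarray_sums : List Int := (PySem.List.pyRange 0 n 1).foldl
    (fun acc i => (PySem.List.pyRange i n 1).foldl
      (fun acc j => acc ++ [(PySem.List.pyGet? prefix_sum (j+1)).getD 0
                            - (PySem.List.pyGet? prefix_sum i).getD 0]) acc) []
  let ss := PySem.List.sorted subarray_sums (fun x => x) false
  (PySem.List.pyGet? ss (k-1)).getD 0

-- ===== PORT B =====
-- Source B's position scan "while pos < len(best) and best[pos] <= s" + insert, as structural recursion
def pvInsert (s : Int) : List Int → List Int
  | [] => [s]
  | x :: xs => if x ≤ s then x :: pvInsert s xs else s :: x :: xs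

-- Source B's loop body for one running sum s
def pvStep (k : Int) (best : List Int) (s : Int) : List Int :=
  if (best.length : Int) < k ∨ s < (PySem.List.pyGet? best (-1)).getD 0 then
    let b := pvInsert s best
    if (b.length : Int) > k then b.dropLast else b
  else best

def kthSmallestSubarraySum_alt (nums : List Int) (k : Int) : Int :=
  let n : Int := (nums.length : Int)
  let best : List Int := (PySem.List.pyRange 0 n 1).foldl
    (fun best i => ((PySem.List.slice nums (some i) none).foldl
        (fun (p : Int × List Int) x => (p.1 + x, pvStep k p.2 (p.1 + x))) ((0 : Int), best)).2) []
  (PySem.List.pyGet? best (-1)).getD 0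

-- ===== PRECONDITION & SPEC =====
-- Pre_ excludes k < 1, where A returns an accidental value via Python's negative-index
-- wraparound while B's buffer stays empty and best[-1] raises IndexError, and
-- k > n(n+1)/2, where A itself raises IndexError.
def Pre_kthSmallestSubarraySum (nums : List Int) (k : Int) : Prop :=
  1 ≤ k ∧ k ≤ ((nums.length * (nums.length + 1)) / 2 : Nat)
instance (nums : List Int) (k : Int) : Decidable (Pre_kthSmallestSubarraySum nums k) := by
  unfold Pre_kthSmallestSubarraySum; infer_instance
def pvWitness_kthSmallestSubarraySum : List Int × Int := ([1, 2], 2)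

def Spec_kthSmallestSubarraySum (nums : List Int) (k : Int) (out : Int) : Prop := out = kthSmallestSubarraySum_alt nums k
instance (nums : List Int) (k : Int) (out : Int) : Decidable (Spec_kthSmallestSubarraySum nums k out) := by unfold Spec_kthSmallestSubarraySum; infer_instance

-- ===== CLAIM (what is proved, stated in full; the proofs are below) =====
def Claim_equal_kthSmallestSubarraySum : Prop := ∀ (nums : List Int) (k : Int), Dom_kthSmallestSubarraySum nums k → Pre_kthSmallestSubarraySum nums k → Spec_kthSmallestSubarraySum nums k (kthSmallestSubarraySum nums k)

-- ===== LEMMAS AND PROOFS =====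

-- running sums of l starting from accumulator s0 (the values B feeds to pvStep)
def psums (s0 : Int) : List Int → List Int
  | [] => []
  | x :: xs => (s0 + x) :: psums (s0 + x) xs

-- all subarray sums of nums in A's (and B's) generation order
def allSums : List Int → List Int
  | [] => []
  | x :: xs => psums 0 (x :: xs) ++ allSums xs

-- left-to-right insertion sort (what B's buffer computes before truncation)
def isort (l : List Int) : List Int := l.foldl (fun b s => pvInsert s b) []

theorem length_psums (s0 : Int) (l : List Int) : (psums s0 l).length = l.length := by
  induction l generalizing s0 with
  | nil => rfl
  | cons x xs ih => simp [psums, ih]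

theorem psums_append (s0 : Int) (l m : List Int) :
    psums s0 (l ++ m) = psums s0 l ++ psums (s0 + l.sum) m := by
  induction l generalizing s0 with
  | nil => simp [psums]
  | cons x xs ih => simp [psums, ih, add_assoc]

theorem getElem?_cons_psums (l : List Int) (s0 : Int) (t : Nat) (h : t ≤ l.length) :
    (s0 :: psums s0 l)[t]? = some (s0 + (l.take t).sum) := by
  induction l generalizing s0 t with
  | nil => simp at h; subst h; simp
  | cons x xs ih =>
      cases t with
      | zero => simp
      | succ t =>
          have := ih (s0 + x) t (by simpa using h)
          simpa [psums, add_assoc] using this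

theorem psums_eq_map (s0 : Int) (l : List Int) :
    psums s0 l = (List.range l.length).map (fun t => s0 + (l.take (t+1)).sum) := by
  induction l generalizing s0 with
  | nil => rfl
  | cons x xs ih =>
      simp [psums, List.range_succ_eq_map, ih, Function.comp, add_assoc]

theorem sum_take_drop (l : List Int) (a b : Nat) :
    ((l.drop a).take b).sum = (l.take (a+b)).sum - (l.take a).sum := by
  rw [List.take_add, List.sum_append]; ring

theorem length_allSums (l : List Int) : 2 * (allSums l).length = l.length * (l.length + 1) := by
  induction l with
  | nil => rfl
  | cons x xs ih =>
      simp only [allSums, List.length_append, length_psums, List.length_cons]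
      nlinarith [ih]
theorem prefixA (nums : List Int) (m : Nat) (hm : m ≤ nums.length) :
    (PySem.List.pyRange 0 (m : Int) 1).foldl
      (fun ps i => ps ++ [(PySem.List.pyGet? ps i).getD 0 + (PySem.List.pyGet? nums i).getD 0]) [0]
    = 0 :: psums 0 (nums.take m) := by
  induction m with
  | zero => simp [PySem.List.pyRange_one_eq_nil, psums]
  | succ m ih =>
      have h1 : ((m:Int)) ≤ ((m:Int) + 1) := by omega
      have hrange : PySem.List.pyRange 0 ((m:Int)+1) 1
          = PySem.List.pyRange 0 (m:Int) 1 ++ [(m:Int)] :=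
        PySem.List.pyRange_one_succ_right (by positivity)
      have hm' : m < nums.length := by omega
      push_cast
      rw [hrange, List.foldl_append, ih (by omega)]
      simp only [List.foldl_cons, List.foldl_nil]
      have hps : PySem.List.pyGet? (0 :: psums 0 (nums.take m)) ((m:Int)) = some ((nums.take m).sum) := by
        rw [PySem.List.pyGet?_natCast]
        have := getElem?_cons_psums (nums.take m) 0 m (by simp; omega)
        simpa [List.take_take] using this
      have hnm : PySem.List.pyGet? nums ((m:Int)) = some (nums[m]'hm') := by
        rw [PySem.List.pyGet?_natCast]; simp [hm']
      rw [hps, hnm]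
      have htake : nums.take (m+1) = nums.take m ++ [nums[m]'hm'] := by
        rw [List.take_succ]; simp [hm']
      rw [htake, psums_append]
      simp [psums]
theorem chunk_eq (nums : List Int) (a : Nat) (ha : a ≤ nums.length) :
    (PySem.List.pyRange (a : Int) (nums.length : Int) 1).map
      (fun j => (PySem.List.pyGet? (0 :: psums 0 nums) (j+1)).getD 0
                - (PySem.List.pyGet? (0 :: psums 0 nums) (a : Int)).getD 0)
    = psums 0 (nums.drop a) := by
  rw [PySem.List.pyRange_one]
  have hlen : ((nums.length : Int) - (a : Int)).toNat = nums.length - a := by omega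
  rw [hlen, List.map_map]
  conv_rhs => rw [psums_eq_map, List.length_drop]
  apply List.map_congr_left
  intro b hb
  have hb' : b < nums.length - a := List.mem_range.mp hb
  have h1 : ((a:Int) + (b:Int) + 1) = ((a + b + 1 : Nat) : Int) := by push_cast; ring
  have hA : PySem.List.pyGet? (0 :: psums 0 nums) ((a:Int)+(b:Int)+1)
      = some ((nums.take (a+b+1)).sum) := by
    rw [h1, PySem.List.pyGet?_natCast, getElem?_cons_psums nums 0 (a+b+1) (by omega)]
    simp
  have hB : PySem.List.pyGet? (0 :: psums 0 nums) ((a:Int))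
      = some ((nums.take a).sum) := by
    rw [PySem.List.pyGet?_natCast, getElem?_cons_psums nums 0 a (by omega)]
    simp
  simp only [Function.comp, hA, hB, Option.getD_some, sum_take_drop, zero_add]
  have : a + (b + 1) = a + b + 1 := by omega
  rw [this]

theorem allSums_eq_flatMap (l : List Int) :
    (List.range l.length).flatMap (fun a => psums 0 (l.drop a)) = allSums l := by
  induction l with
  | nil => rfl
  | cons x xs ih =>
      rw [List.length_cons, List.range_succ_eq_map, List.flatMap_cons, List.flatMap_map]
      simp only [List.drop_zero, List.drop_succ_cons, allSums]
      rw [ih]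

theorem sumsA (nums : List Int) :
    (PySem.List.pyRange 0 (nums.length : Int) 1).foldl
      (fun acc i => (PySem.List.pyRange i (nums.length : Int) 1).foldl
        (fun acc j => acc ++ [(PySem.List.pyGet? (0 :: psums 0 nums) (j+1)).getD 0
                              - (PySem.List.pyGet? (0 :: psums 0 nums) i).getD 0]) acc) []
    = allSums nums := by
  have hinner : ∀ (acc : List Int) (i : Int),
      (PySem.List.pyRange i (nums.length : Int) 1).foldl
        (fun acc j => acc ++ [(PySem.List.pyGet? (0 :: psums 0 nums) (j+1)).getD 0
                              - (PySem.List.pyGet? (0 :: psums 0 nums) i).getD 0]) acc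
      = acc ++ (PySem.List.pyRange i (nums.length : Int) 1).map
          (fun j => (PySem.List.pyGet? (0 :: psums 0 nums) (j+1)).getD 0
                    - (PySem.List.pyGet? (0 :: psums 0 nums) i).getD 0) := by
    intro acc i
    exact PySem.List.foldl_append_singleton_eq_map _ _ _
  rw [PySem.List.foldl_congr_mem _ _ _ _ (fun acc i _ => hinner acc i)]
  rw [PySem.List.foldl_append_eq_flatMap]
  rw [List.nil_append]
  rw [PySem.List.pyRange_one]
  simp only [Int.sub_zero, Int.toNat_natCast, List.flatMap_map, zero_add]
  rw [← allSums_eq_flatMap]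
  apply List.flatMap_congr
  intro a ha
  exact chunk_eq nums a (le_of_lt (List.mem_range.mp ha))
theorem pairFold (k : Int) (l : List Int) (s0 : Int) (best : List Int) :
    (l.foldl (fun (p : Int × List Int) x => (p.1 + x, pvStep k p.2 (p.1 + x))) (s0, best)).2
    = List.foldl (pvStep k) best (psums s0 l) := by
  induction l generalizing s0 best with
  | nil => rfl
  | cons x xs ih => simpa [psums] using ih (s0 + x) (pvStep k best (s0 + x))

theorem altFold (k : Int) (nums : List Int) :
    (PySem.List.pyRange 0 (nums.length : Int) 1).foldl
      (fun best i => ((PySem.List.slice nums (some i) none).foldl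
          (fun (p : Int × List Int) x => (p.1 + x, pvStep k p.2 (p.1 + x))) ((0 : Int), best)).2) []
    = List.foldl (pvStep k) [] (allSums nums) := by
  rw [← allSums_eq_flatMap, List.foldl_flatMap]
  rw [PySem.List.pyRange_one]
  simp only [Int.sub_zero, Int.toNat_natCast, List.foldl_map, zero_add]
  apply PySem.List.foldl_congr_mem
  intro acc a _
  rw [PySem.List.slice_from_natCast, pairFold]
theorem pvInsert_perm (s : Int) (l : List Int) : (pvInsert s l).Perm (s :: l) := by
  induction l with
  | nil => rfl
  | cons x xs ih =>
      by_cases h : x ≤ s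
      · simpa [pvInsert, h] using ((ih.cons x).trans (List.Perm.swap s x xs))
      · simp [pvInsert, h]

theorem pvInsert_length (s : Int) (l : List Int) : (pvInsert s l).length = l.length + 1 :=
  (pvInsert_perm s l).length_eq

theorem pvInsert_pairwise (s : Int) (l : List Int) (h : l.Pairwise (· ≤ ·)) :
    (pvInsert s l).Pairwise (· ≤ ·) := by
  induction l with
  | nil => simp [pvInsert]
  | cons x xs ih =>
      rcases List.pairwise_cons.mp h with ⟨hx, hxs⟩
      by_cases hxle : x ≤ s
      · rw [pvInsert, if_pos hxle]
        refine List.pairwise_cons.mpr ⟨?_, ih hxs⟩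
        intro y hy
        rcases List.mem_cons.mp ((pvInsert_perm s xs).mem_iff.mp hy) with rfl | hy
        · exact hxle
        · exact hx y hy
      · rw [pvInsert, if_neg hxle]
        refine List.pairwise_cons.mpr ⟨?_, h⟩
        intro y hy
        rcases List.mem_cons.mp hy with rfl | hy
        · omega
        · exact le_trans (by omega) (hx y hy)

theorem pvInsert_of_all_le (s : Int) (l : List Int) (h : ∀ x ∈ l, x ≤ s) :
    pvInsert s l = l ++ [s] := by
  induction l with
  | nil => rfl
  | cons x xs ih =>
      rw [pvInsert, if_pos (h x List.mem_cons_self), ih (fun y hy => h y (List.mem_cons_of_mem x hy))]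
      rfl

theorem le_getLast_of_pairwise : ∀ (l : List Int), l.Pairwise (· ≤ ·) → ∀ (hne : l ≠ []) (x : Int), x ∈ l → x ≤ l.getLast hne := by
  intro l
  induction l with
  | nil => intro _ hne; cases hne rfl
  | cons a xs ih =>
      intro h hne x hx
      rcases List.pairwise_cons.mp h with ⟨ha, hxs⟩
      cases xs with
      | nil =>
          simp only [List.mem_cons] at hx
          rcases hx with rfl | hx
          · simp
          · cases hx
      | cons b ys =>
          rw [List.getLast_cons (by simp)]
          rcases List.mem_cons.mp hx with rfl | hx
          · exact le_trans (ha b (by simp)) (ih hxs (by simp) b (by simp))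
          · exact ih hxs (by simp) x hx

theorem insert_take (s : Int) (l : List Int) (kn : Nat) :
    (pvInsert s (l.take kn)).take kn = (pvInsert s l).take kn := by
  induction l generalizing kn with
  | nil => simp
  | cons x xs ih =>
      cases kn with
      | zero => simp
      | succ m =>
          rw [List.take_succ_cons, pvInsert, pvInsert]
          by_cases h : x ≤ s
          · rw [if_pos h, if_pos h, List.take_succ_cons, List.take_succ_cons, ih m]
          · rw [if_neg h, if_neg h, List.take_succ_cons, List.take_succ_cons]
            cases m with
            | zero => simp
            | succ m' => rw [List.take_succ_cons, List.take_succ_cons, List.take_take]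
                         simp
theorem step_eq (k : Int) (hk : 1 ≤ k) (b : List Int) (s : Int)
    (hs : b.Pairwise (· ≤ ·)) (hlen : b.length ≤ k.toNat) :
    pvStep k b s = (pvInsert s b).take k.toNat := by
  by_cases h1 : (b.length : Int) < k
  · have hlt : ¬ (((pvInsert s b).length : Int) > k) := by
      rw [pvInsert_length]; push_cast; omega
    rw [pvStep, if_pos (Or.inl h1), if_neg hlt]
    exact (List.take_of_length_le (by rw [pvInsert_length]; omega)).symm
  · have hbl : b.length = k.toNat := by omega
    have hne : b ≠ [] := by
      intro h; rw [h] at hbl; simp at hbl; omega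
    have hlast : PySem.List.pyGet? b (-1) = some (b.getLast hne) := by
      rw [PySem.List.pyGet?_neg_one, List.getLast?_eq_getLast]
    by_cases h2 : s < b.getLast hne
    · rw [pvStep, if_pos (Or.inr (by rw [hlast]; exact h2))]
      have hgt : ((pvInsert s b).length : Int) > k := by rw [pvInsert_length]; push_cast; omega
      simp only [hgt, if_pos]
      rw [List.dropLast_eq_take, pvInsert_length, hbl]
      simp
    · rw [pvStep, if_neg (by rw [hlast]; simp; constructor <;> omega)]
      rw [pvInsert_of_all_le s b
        (fun x hx => le_trans (le_getLast_of_pairwise b hs hne x hx) (by omega))]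
      rw [← hbl, List.take_left]

theorem fold_take (kn : Nat) (L : List Int) : ∀ (b : List Int),
    L.foldl (fun b s => (pvInsert s b).take kn) (b.take kn)
    = (L.foldl (fun b s => pvInsert s b) b).take kn := by
  induction L with
  | nil => intro b; rfl
  | cons x L ih =>
      intro b
      rw [List.foldl_cons, List.foldl_cons, insert_take]
      exact ih (pvInsert x b)

theorem fold_sel (k : Int) (hk : 1 ≤ k) (L : List Int) : ∀ (b : List Int),
    b.Pairwise (· ≤ ·) → b.length ≤ k.toNat →
    L.foldl (pvStep k) b = L.foldl (fun b s => (pvInsert s b).take k.toNat) b := by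
  induction L with
  | nil => intro b _ _; rfl
  | cons x L ih =>
      intro b hb hbl
      rw [List.foldl_cons, List.foldl_cons, step_eq k hk b x hb hbl]
      exact ih _ ((pvInsert_pairwise x b hb).sublist (List.take_sublist _ _))
        (le_trans (List.length_take_le _ _) le_rfl)

theorem foldSel (k : Int) (hk : 1 ≤ k) (L : List Int) :
    L.foldl (pvStep k) [] = (isort L).take k.toNat := by
  rw [fold_sel k hk L [] (by simp) (by simp), isort]
  conv_lhs => rw [show ([] : List Int) = (([] : List Int).take k.toNat) from by simp]
  exact fold_take k.toNat L []

theorem isort_perm (L : List Int) : (isort L).Perm L := by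
  have h : ∀ (b : List Int), (L.foldl (fun b s => pvInsert s b) b).Perm (L ++ b) := by
    induction L with
    | nil => intro b; simp
    | cons x L ih =>
        intro b
        refine (ih (pvInsert x b)).trans ?_
        refine ((List.Perm.append_left L (pvInsert_perm x b)).trans ?_)
        exact List.perm_middle
  simpa using h []

theorem isort_pairwise (L : List Int) : (isort L).Pairwise (· ≤ ·) := by
  have h : ∀ (b : List Int), b.Pairwise (· ≤ ·) →
      (L.foldl (fun b s => pvInsert s b) b).Pairwise (· ≤ ·) := by
    induction L with
    | nil => intro b hb; exact hb
    | cons x L ih => intro b hb; exact ih _ (pvInsert_pairwise x b hb)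
  exact h [] (by simp)

theorem sorted_eq_isort (L : List Int) :
    PySem.List.sorted L (fun x => x) false = isort L := by
  refine List.eq_of_perm_of_sorted (le := (· ≤ ·)) ?_ ?_ ?_ ?_
  · intro a b _ _ h1 h2; omega
  · exact PySem.List.sorted_pairwise L (fun x => x)
  · exact isort_pairwise L
  · exact (PySem.List.sorted_perm L (fun x => x) false).trans (isort_perm L).symm
theorem main_eq (nums : List Int) (k : Int) (hpre : Pre_kthSmallestSubarraySum nums k) :
    kthSmallestSubarraySum nums k = kthSmallestSubarraySum_alt nums k := by
  obtain ⟨hk1, hk2⟩ := hpre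
  have hTlen : 2 * (allSums nums).length = nums.length * (nums.length + 1) := length_allSums nums
  have hSlen : (isort (allSums nums)).length = (allSums nums).length :=
    (isort_perm (allSums nums)).length_eq
  have hkn : 1 ≤ k.toNat ∧ k.toNat ≤ (isort (allSums nums)).length := by
    rw [hSlen]
    generalize hM : nums.length * (nums.length + 1) = M at hTlen hk2
    omega
  -- reduce A to an indexed read of isort (allSums nums)
  have hA : kthSmallestSubarraySum nums k
      = (PySem.List.pyGet? (isort (allSums nums)) (k-1)).getD 0 := by
    show (PySem.List.pyGet? (PySem.List.sorted _ _ false) (k-1)).getD 0 = _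
    rw [prefixA nums nums.length le_rfl, List.take_length, sumsA, sorted_eq_isort]
  -- reduce B to the last element of the k-truncated buffer
  have hB : kthSmallestSubarraySum_alt nums k
      = (PySem.List.pyGet? ((isort (allSums nums)).take k.toNat) (-1)).getD 0 := by
    show (PySem.List.pyGet? ((PySem.List.pyRange 0 (nums.length : Int) 1).foldl _ []) (-1)).getD 0 = _
    rw [altFold k nums, foldSel k hk1]
  rw [hA, hB]
  -- both reads hit index k.toNat - 1 of the sorted list
  set S := isort (allSums nums) with hS
  have hidx : (k-1).toNat = k.toNat - 1 := by omega
  have hlt : k.toNat - 1 < S.length := by omega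
  rw [PySem.List.pyGet?_of_nonneg S (by omega : (0:Int) ≤ k - 1), hidx]
  rw [PySem.List.pyGet?_neg_one, List.getLast?_eq_getElem?]
  have hlen_take : (S.take k.toNat).length = k.toNat := by
    rw [List.length_take]; omega
  rw [hlen_take]
  rw [List.getElem?_take_of_lt (by omega)]

-- ===== VERDICT (by name: the statement is the Claim_ definition above) =====
theorem kthSmallestSubarraySum_spec : Claim_equal_kthSmallestSubarraySum := by
  intro nums k _ hpre
  unfold Spec_kthSmallestSubarraySum
  exact main_eq nums k hpre
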